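-- pv_equiv track=rewrite | github.com/lclpsoz/competitive-programming | cf-1174/bruteD.py | check
-- ===== SOURCE A (Python) =====
-- def check (lst, x):
--     for i in range (len (lst)):
--         for j in range (i, len(lst)):
--             ax = 0
--             for k in range (i, j+1):
--                 ax ^= lst[k]
--             if (ax == 0 or ax == x):
--                 return False
--     return True
-- ===== SOURCE B (Python) =====
-- def check(lst, x):
--     # Prefix-XOR scan: a subarray XOR is 0 or x iff two prefix XORs are
--     # equal or differ by x; keep all prefix XORs seen so far in a set.
--     seen = {0}
--     p = 0
--     for v in lst:
--         p ^= v
--         if p in seen or (p ^ x) in seen: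
--             return False
--         seen.add(p)
--     return True
-- ===== Notes on version B (the rewrite author's own statement) =====
-- stated objective: faster
-- what changed: Replaced the triple nested loop recomputing each subarray XOR with a single pass over prefix XORs kept in a hash set, testing p and p^x for membership.
import Mathlib
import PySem

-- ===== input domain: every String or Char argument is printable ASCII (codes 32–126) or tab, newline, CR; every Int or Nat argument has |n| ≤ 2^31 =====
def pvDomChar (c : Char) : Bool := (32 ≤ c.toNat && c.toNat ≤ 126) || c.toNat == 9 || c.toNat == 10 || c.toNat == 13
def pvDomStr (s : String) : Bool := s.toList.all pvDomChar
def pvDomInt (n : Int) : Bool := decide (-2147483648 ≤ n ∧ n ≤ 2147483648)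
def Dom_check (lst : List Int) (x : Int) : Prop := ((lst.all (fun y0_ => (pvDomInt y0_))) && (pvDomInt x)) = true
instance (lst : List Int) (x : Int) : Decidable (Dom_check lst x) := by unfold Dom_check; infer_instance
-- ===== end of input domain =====

-- B replaces A's O(n^3) triple loop (XOR of every subarray from scratch) by a single
-- pass over prefix XORs kept in a set, testing p and p^x for membership (objective: faster).

-- ===== PORT A =====
-- triple nested loop: for i, for j in [i,n), recompute XOR of lst[i..j], early-return False
def check (lst : List Int) (x : Int) : Bool :=
  (List.range lst.length).all (fun i =>
    (List.range' i (lst.length - i)).all (fun j =>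
      let ax := (List.range' i (j + 1 - i)).foldl
        (fun ax k => PySem.Int.bxor ax (lst.getD k 0)) 0
      !(ax == 0 || ax == x)))

-- ===== PORT B =====
-- one pass: p = running prefix XOR, seen = set of earlier prefix XORs (starts {0})
def checkAltLoop (x : Int) : List Int → Int → PySem.Set Int → Bool
  | [], _, _ => true
  | v :: rest, p, seen =>
    let p' := PySem.Int.bxor p v
    if PySem.Set.contains seen p' || PySem.Set.contains seen (PySem.Int.bxor p' x) then
      false
    else
      checkAltLoop x rest p' (PySem.Set.add seen p')

def check_alt (lst : List Int) (x : Int) : Bool :=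
  checkAltLoop x lst 0 (PySem.Set.ofList [0])

-- ===== PRECONDITION & SPEC =====
def Spec_check (lst : List Int) (x : Int) (out : Bool) : Prop := out = check_alt lst x
instance (lst : List Int) (x : Int) (out : Bool) : Decidable (Spec_check lst x out) := by unfold Spec_check; infer_instance

-- ===== CLAIM (what is proved, stated in full; the proofs are below) =====
def Claim_equal_check : Prop := ∀ (lst : List Int) (x : Int), Dom_check lst x → Spec_check lst x (check lst x)

-- ===== LEMMAS AND PROOFS =====

-- XOR group laws for PySem.Int.bxor, via Lean core's Int.xor (same function)
theorem pvBxor_eq_xor (a b : Int) : PySem.Int.bxor a b = Int.xor a b := by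
  cases a <;> cases b <;>
    simp [PySem.Int.bxor, Int.xor, Int.negSucc_eq] <;> omega

theorem pvBxor_assoc (a b c : Int) :
    PySem.Int.bxor (PySem.Int.bxor a b) c = PySem.Int.bxor a (PySem.Int.bxor b c) := by
  simp only [pvBxor_eq_xor]
  cases a <;> cases b <;> cases c <;> simp [Int.xor, Nat.xor_assoc]

theorem pvBxor_cancel_left (a b : Int) : PySem.Int.bxor a (PySem.Int.bxor a b) = b := by
  rw [← pvBxor_assoc, PySem.Int.bxor_self]
  rw [PySem.Int.bxor_comm]; exact PySem.Int.bxor_zero b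

theorem pvBxor_eq_zero_iff (a b : Int) : PySem.Int.bxor a b = 0 ↔ a = b := by
  constructor
  · intro h
    have := congrArg (PySem.Int.bxor a) h
    rw [pvBxor_cancel_left, PySem.Int.bxor_zero] at this
    exact this.symm
  · rintro rfl; exact PySem.Int.bxor_self a

theorem pvBxor_eq_iff (a b x : Int) : a = PySem.Int.bxor b x ↔ PySem.Int.bxor a b = x := by
  constructor
  · rintro rfl
    rw [PySem.Int.bxor_comm b x, pvBxor_assoc, PySem.Int.bxor_self, PySem.Int.bxor_zero]
  · rintro rfl
    rw [PySem.Int.bxor_comm, pvBxor_assoc, PySem.Int.bxor_self, PySem.Int.bxor_zero]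

-- prefix XOR of the first k elements
def pvPref (lst : List Int) (k : Nat) : Int :=
  (lst.take k).foldl PySem.Int.bxor 0

theorem pvPref_zero (lst : List Int) : pvPref lst 0 = 0 := rfl

theorem pvPref_succ (lst : List Int) (k : Nat) (h : k < lst.length) :
    pvPref lst (k + 1) = PySem.Int.bxor (pvPref lst k) lst[k] := by
  unfold pvPref
  rw [← List.take_concat_get' lst k h, List.foldl_append]
  rfl

-- the "no bad pair of prefixes up to bound" predicate both programs decide
def pvGood (lst : List Int) (x : Int) (a b : Nat) : Prop :=
  PySem.Int.bxor (pvPref lst a) (pvPref lst b) ≠ 0 ∧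
  PySem.Int.bxor (pvPref lst a) (pvPref lst b) ≠ x

-- A's inner segment fold equals the XOR of two prefix XORs
theorem pvSeg_eq (lst : List Int) (c : Int) :
    ∀ (t s : Nat), s + t ≤ lst.length →
      (List.range' s t).foldl (fun ax k => PySem.Int.bxor ax (lst.getD k 0)) c
        = PySem.Int.bxor c (PySem.Int.bxor (pvPref lst s) (pvPref lst (s + t))) := by
  intro t
  induction t generalizing c with
  | zero => intro s _; simp [PySem.Int.bxor_self, PySem.Int.bxor_zero]
  | succ t ih =>
    intro s hst
    have hs : s < lst.length := by omega
    rw [List.range'_succ, List.foldl_cons]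
    have : s + (t + 1) = (s + 1) + t := by omega
    rw [this, ih (PySem.Int.bxor c (lst.getD s 0)) (s + 1) (by omega)]
    rw [List.getD_eq_getElem lst 0 hs, pvPref_succ lst s hs]
    rw [pvBxor_assoc]
    congr 1
    simp only [← pvBxor_assoc]
    rw [PySem.Int.bxor_comm lst[s] (pvPref lst s), pvBxor_assoc (pvPref lst s),
      PySem.Int.bxor_self, PySem.Int.bxor_zero]

-- characterisation of A
theorem pvCheck_iff (lst : List Int) (x : Int) :
    check lst x = true ↔ ∀ a b : Nat, a < b → b ≤ lst.length → pvGood lst x a b := by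
  unfold check
  simp only [List.all_eq_true, List.mem_range, List.mem_range'_1, Bool.not_eq_eq_eq_not,
    Bool.not_true, Bool.or_eq_false_iff, beq_eq_false_iff_ne, ne_eq]
  constructor
  · intro h a b hab hb
    have ha : a < lst.length := by omega
    have := h a ha (b - 1) ⟨by omega, by omega⟩
    rw [pvSeg_eq lst 0 (b - 1 + 1 - a) a (by omega)] at this
    have hb' : a + (b - 1 + 1 - a) = b := by omega
    rw [hb'] at this
    rw [PySem.Int.bxor_comm, PySem.Int.bxor_zero] at this
    exact this
  · intro h i hi j hj
    have := h i (j + 1) (by omega) (by omega)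
    rw [pvSeg_eq lst 0 (j + 1 - i) i (by omega)]
    have : i + (j + 1 - i) = j + 1 := by omega
    rw [this, PySem.Int.bxor_comm, PySem.Int.bxor_zero]
    exact h i (j + 1) (by omega) (by omega)

-- characterisation of B's loop, by induction on the unprocessed suffix
theorem pvAltLoop_iff (x : Int) (lst : List Int) :
    ∀ (k : Nat) (seen : PySem.Set Int), k ≤ lst.length →
    (∀ q, q ∈ seen ↔ ∃ a, a ≤ k ∧ pvPref lst a = q) →
    (checkAltLoop x (lst.drop k) (pvPref lst k) seen = true ↔
      ∀ a b : Nat, a < b → b ≤ lst.length → k < b → pvGood lst x a b) := by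
  intro k
  induction' hn : lst.length - k with n ih generalizing k
  case zero =>
    intro seen hk _
    have : k = lst.length := by omega
    subst this
    rw [List.drop_length]
    simp only [checkAltLoop, true_iff]
    intro a b _ hb hkb; omega
  case succ =>
    intro seen hk hseen
    have hklt : k < lst.length := by omega
    rw [List.drop_eq_getElem_cons hklt]
    simp only [checkAltLoop]
    rw [← pvPref_succ lst k hklt]
    by_cases hcond :
        (PySem.Set.contains seen (pvPref lst (k + 1)) ||
          PySem.Set.contains seen (PySem.Int.bxor (pvPref lst (k + 1)) x)) = true
    · rw [if_pos hcond]
      simp only [Bool.false_eq_true, false_iff, not_forall]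
      rcases Bool.or_eq_true_iff.mp hcond with hmem | hmem
      · rcases (hseen _).mp (by simpa using hmem) with ⟨a, hak, ha⟩
        refine ⟨a, k + 1, by omega, by omega, by omega, ?_⟩
        intro hgood
        exact hgood.1 ((pvBxor_eq_zero_iff _ _).mpr ha)
      · rcases (hseen _).mp (by simpa using hmem) with ⟨a, hak, ha⟩
        refine ⟨a, k + 1, by omega, by omega, by omega, ?_⟩
        intro hgood
        exact hgood.2 ((pvBxor_eq_iff _ _ _).mp ha)
    · rw [if_neg hcond]
      simp only [Bool.or_eq_true, not_or] at hcond
      have h1 : pvPref lst (k + 1) ∉ seen := fun hm => hcond.1 (by simpa using hm)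
      have h2 : PySem.Int.bxor (pvPref lst (k + 1)) x ∉ seen := fun hm =>
        hcond.2 (by simpa using hm)
      have hseen' : ∀ q, q ∈ PySem.Set.add seen (pvPref lst (k + 1)) ↔
          ∃ a, a ≤ k + 1 ∧ pvPref lst a = q := by
        intro q
        rw [PySem.Set.mem_add]
        constructor
        · rintro (hq | rfl)
          · rcases (hseen q).mp hq with ⟨a, hak, ha⟩
            exact ⟨a, by omega, ha⟩
          · exact ⟨k + 1, le_refl _, rfl⟩
        · rintro ⟨a, hak, rfl⟩
          rcases Nat.lt_or_ge a (k + 1) with hlt | hge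
          · exact Or.inl ((hseen _).mpr ⟨a, by omega, rfl⟩)
          · have : a = k + 1 := by omega
            subst this; exact Or.inr rfl
      rw [ih (k + 1) (by omega) (PySem.Set.add seen (pvPref lst (k + 1))) (by omega) hseen']
      constructor
      · intro h a b hab hb hkb
        rcases Nat.lt_or_ge (k + 1) b with hb2 | hb2
        · exact h a b hab hb hb2
        · have hbk : b = k + 1 := by omega
          subst hbk
          constructor
          · intro h0
            exact h1 ((hseen _).mpr ⟨a, by omega, (pvBxor_eq_zero_iff _ _).mp h0⟩)
          · intro hx
            exact h2 ((hseen _).mpr ⟨a, by omega, (pvBxor_eq_iff _ _ _).mpr hx⟩)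
      · intro h a b hab hb hkb
        exact h a b hab hb (by omega)

-- ===== VERDICT (by name: the statement is the Claim_ definition above) =====
theorem check_spec : Claim_equal_check := by
  intro lst x _
  unfold Spec_check
  have hB := pvAltLoop_iff x lst 0 (PySem.Set.ofList [0]) (Nat.zero_le _) (by
    intro q
    constructor
    · intro hq
      simp only [PySem.Set.mem_ofList, List.mem_singleton] at hq
      exact ⟨0, le_refl _, hq.symm⟩
    · rintro ⟨a, ha, rfl⟩
      have : a = 0 := by omega
      subst this
      simp [PySem.Set.mem_ofList, pvPref_zero])
  rw [List.drop_zero, pvPref_zero] at hB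
  have hBalt : check_alt lst x = checkAltLoop x lst 0 (PySem.Set.ofList [0]) := rfl
  have hA := pvCheck_iff lst x
  rw [Bool.eq_iff_iff, hA, hBalt, hB]
  constructor
  · intro h a b hab hb _; exact h a b hab hb
  · intro h a b hab hb; exact h a b hab hb (by omega)
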